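-- pv_equiv track=rewrite | github.com/Taitran2202/StorageWall | modules/scan_barcode/utils.py | detect_most_right_bottom_corner
-- ===== SOURCE A (Python) =====
-- def detect_most_right_bottom_corner(points):
--     if not points:
--         return None
--
--     # Initialize variables to store the maximum x-coordinate and y-coordinate
--     max_x = points[0][0]
--     max_y = points[0][1]
--
--     # Iterate through the points to find the maximum x and y coordinates
--     for point in points:
--         x, y = point
--         if x > max_x:
--             max_x = x
--             max_y = y
--         elif x == max_x and y > max_y:
--             max_y = y
--
--     # Return the most right bottom corner point
--     return (max_x, max_y)
-- ===== SOURCE B (Python) =====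
-- def detect_most_right_bottom_corner(points):
--     if not points:
--         return None
--     max_x = max(x for x, y in points)
--     max_y = max(y for x, y in points if x == max_x)
--     return (max_x, max_y)
-- ===== Notes on version B (the rewrite author's own statement) =====
-- stated objective: simpler
-- what changed: Replaces A's single running-best scan with coupled (max_x, max_y) state by two independent passes: first max over all x-coordinates, then max over the y-coordinates of points attaining that x.
import Mathlib
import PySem

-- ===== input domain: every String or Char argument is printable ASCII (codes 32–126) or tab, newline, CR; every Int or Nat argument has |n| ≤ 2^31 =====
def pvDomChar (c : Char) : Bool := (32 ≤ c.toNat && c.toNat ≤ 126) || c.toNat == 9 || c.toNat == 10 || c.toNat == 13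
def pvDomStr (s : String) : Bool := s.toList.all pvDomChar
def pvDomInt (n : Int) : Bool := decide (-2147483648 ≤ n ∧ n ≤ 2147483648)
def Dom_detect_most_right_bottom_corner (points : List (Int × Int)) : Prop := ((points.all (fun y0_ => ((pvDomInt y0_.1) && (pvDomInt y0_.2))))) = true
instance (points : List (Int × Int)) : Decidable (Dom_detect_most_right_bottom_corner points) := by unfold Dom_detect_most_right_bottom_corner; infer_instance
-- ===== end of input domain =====

-- B replaces A's single running-best scan (coupled max_x/max_y state) by two independent
-- passes: max over all x-coordinates, then max over the y's of points attaining that x (simpler).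


-- ===== PORT A =====
-- A's loop body: compare point (x, y) against the running (max_x, max_y)
def pvStepA (s : Int × Int) (p : Int × Int) : Int × Int :=
  if p.1 > s.1 then (p.1, p.2)
  else if p.1 = s.1 ∧ p.2 > s.2 then (s.1, p.2)
  else s

def detect_most_right_bottom_corner (points : List (Int × Int)) : Option (Int × Int) :=
  match points with
  | [] => none
  | p0 :: _ =>
    -- max_x, max_y initialised from points[0]; the loop runs over ALL of points
    some (points.foldl pvStepA (p0.1, p0.2))

-- ===== PORT B =====
def detect_most_right_bottom_corner_alt (points : List (Int × Int)) : Option (Int × Int) :=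
  match points with
  | [] => none
  | _ :: _ =>
    match PySem.List.max? (points.map (fun p => p.1)) (fun v => v) with
    | none => none   -- unreachable: points is nonempty
    | some mx =>
      match PySem.List.max? ((points.filter (fun p => p.1 == mx)).map (fun p => p.2)) (fun v => v) with
      | none => none -- unreachable: some point attains mx
      | some my => some (mx, my)

-- ===== PRECONDITION & SPEC =====
def Spec_detect_most_right_bottom_corner (points : List (Int × Int)) (out : Option (Int × Int)) : Prop := out = detect_most_right_bottom_corner_alt points
instance (points : List (Int × Int)) (out : Option (Int × Int)) : Decidable (Spec_detect_most_right_bottom_corner points out) := by unfold Spec_detect_most_right_bottom_corner; infer_instance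

-- ===== CLAIM (what is proved, stated in full; the proofs are below) =====
def Claim_equal_detect_most_right_bottom_corner : Prop := ∀ (points : List (Int × Int)), Dom_detect_most_right_bottom_corner points → Spec_detect_most_right_bottom_corner points (detect_most_right_bottom_corner points)

-- ===== LEMMAS AND PROOFS =====

-- lexicographic order (x first, then y): both programs return the lex-greatest point
def pvLexLe (p q : Int × Int) : Prop := p.1 < q.1 ∨ (p.1 = q.1 ∧ p.2 ≤ q.2)

theorem pvLexLe_antisymm {p q : Int × Int} (h1 : pvLexLe p q) (h2 : pvLexLe q p) : p = q := by
  obtain ⟨a, b⟩ := p; obtain ⟨c, d⟩ := q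
  simp only [pvLexLe] at h1 h2
  simp only [Prod.mk.injEq]
  omega

theorem pvStepA_cases (s p : Int × Int) : pvStepA s p = s ∨ pvStepA s p = p := by
  unfold pvStepA
  split_ifs with h1 h2
  · right; rfl
  · right; obtain ⟨h, _⟩ := h2; exact Prod.ext h.symm rfl
  · left; rfl

theorem pvStepA_le_left (s p : Int × Int) : pvLexLe s (pvStepA s p) := by
  unfold pvStepA pvLexLe; split_ifs <;> omega

theorem pvStepA_le_right (s p : Int × Int) : pvLexLe p (pvStepA s p) := by
  unfold pvStepA pvLexLe; split_ifs <;> omega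

theorem pvLexLe_trans {p q r : Int × Int} (h1 : pvLexLe p q) (h2 : pvLexLe q r) : pvLexLe p r := by
  unfold pvLexLe at *; omega

theorem pvFoldA_mem : ∀ (l : List (Int × Int)) (s : Int × Int),
    List.foldl pvStepA s l = s ∨ List.foldl pvStepA s l ∈ l := by
  intro l
  induction l with
  | nil => intro s; left; rfl
  | cons b t ih =>
    intro s
    simp only [List.foldl_cons]
    rcases ih (pvStepA s b) with h | h
    · rw [h]
      rcases pvStepA_cases s b with h' | h'
      · left; exact h'
      · right; rw [h']; exact List.mem_cons_self
    · right; exact List.mem_cons_of_mem _ h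

theorem pvFoldA_ub : ∀ (l : List (Int × Int)) (s : Int × Int),
    pvLexLe s (List.foldl pvStepA s l) ∧ ∀ p ∈ l, pvLexLe p (List.foldl pvStepA s l) := by
  intro l
  induction l with
  | nil =>
    intro s
    refine ⟨?_, by simp⟩
    simp only [List.foldl_nil]
    unfold pvLexLe; omega
  | cons b t ih =>
    intro s
    simp only [List.foldl_cons]
    obtain ⟨h1, h2⟩ := ih (pvStepA s b)
    refine ⟨pvLexLe_trans (pvStepA_le_left s b) h1, ?_⟩
    intro p hp
    rcases List.mem_cons.mp hp with rfl | hp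
    · exact pvLexLe_trans (pvStepA_le_right s p) h1
    · exact h2 p hp

-- Python's max over a nonempty iterable returns a value
theorem pvMaxSome : ∀ (t : List Int) (a : Int),
    ∃ m, PySem.List.max? (a :: t) (fun v => v) = some m := by
  intro t
  induction t with
  | nil => intro a; exact ⟨a, rfl⟩
  | cons b t ih =>
    intro a
    simp only [PySem.List.max?, List.foldl_cons] at ih ⊢
    by_cases h : a < b
    · obtain ⟨m, hm⟩ := ih b
      exact ⟨m, by simp [h]; simpa [PySem.List.max?] using hm⟩
    · obtain ⟨m, hm⟩ := ih a
      exact ⟨m, by simp [h]; simpa [PySem.List.max?] using hm⟩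

-- B's pair is an upper bound and a member; A's fold result is a member and an upper bound;
-- antisymmetry of the lexicographic order makes them equal.
theorem pvMain (points : List (Int × Int)) :
    detect_most_right_bottom_corner points = detect_most_right_bottom_corner_alt points := by
  match points with
  | [] => rfl
  | p0 :: rest =>
    -- B's first pass returns some mx
    obtain ⟨mx, hmx⟩ := pvMaxSome (rest.map (fun p => p.1)) p0.1
    have hmx' : PySem.List.max? ((p0 :: rest).map (fun p => p.1)) (fun v => v) = some mx := by
      simpa using hmx
    have hmx_mem : mx ∈ (p0 :: rest).map (fun p => p.1) := PySem.List.max?_mem hmx'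
    have hmx_ub : ∀ v ∈ (p0 :: rest).map (fun p => p.1), v ≤ mx := by
      intro v hv; exact PySem.List.max?_isMax hmx' v hv
    -- the filtered list is nonempty, so the second pass returns some my
    obtain ⟨q, hq_mem, hq1⟩ := List.mem_map.mp hmx_mem
    have hq_f : q ∈ (p0 :: rest).filter (fun p => p.1 == mx) :=
      List.mem_filter.mpr ⟨hq_mem, by simp [hq1]⟩
    have hfne : ((p0 :: rest).filter (fun p => p.1 == mx)).map (fun p => p.2) ≠ [] := by
      simp only [ne_eq, List.map_eq_nil_iff]
      intro h; rw [h] at hq_f; exact absurd hq_f (List.not_mem_nil)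
    obtain ⟨c, cs, hcs⟩ := List.exists_cons_of_ne_nil hfne
    obtain ⟨my, hmy0⟩ := pvMaxSome cs c
    have hmy : PySem.List.max? (((p0 :: rest).filter (fun p => p.1 == mx)).map (fun p => p.2)) (fun v => v) = some my := by
      rw [hcs]; exact hmy0
    have hmy_mem := PySem.List.max?_mem hmy
    have hmy_ub := fun v hv => PySem.List.max?_isMax hmy v hv
    -- (mx, my) ∈ (p0 :: rest)
    obtain ⟨r, hr_f, hr2⟩ := List.mem_map.mp hmy_mem
    obtain ⟨hr_mem, hr1⟩ := List.mem_filter.mp hr_f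
    have hr1' : r.1 = mx := by simpa using hr1
    have hB_mem : (mx, my) ∈ (p0 :: rest) := by
      have : r = (mx, my) := by
        obtain ⟨r1, r2⟩ := r; simp_all
      rwa [this] at hr_mem
    -- (mx, my) is a lex upper bound of (p0 :: rest)
    have hB_ub : ∀ p ∈ (p0 :: rest), pvLexLe p (mx, my) := by
      intro p hp
      have h1 : p.1 ≤ mx := hmx_ub p.1 (List.mem_map.mpr ⟨p, hp, rfl⟩)
      by_cases he : p.1 = mx
      · have hpf : p ∈ (p0 :: rest).filter (fun p => p.1 == mx) :=
          List.mem_filter.mpr ⟨hp, by simp [he]⟩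
        have h2 : p.2 ≤ my := hmy_ub p.2 (List.mem_map.mpr ⟨p, hpf, rfl⟩)
        right; exact ⟨he, h2⟩
      · left; omega
    -- A's result
    have hA_mem : List.foldl pvStepA (p0.1, p0.2) (p0 :: rest) ∈ (p0 :: rest) := by
      rcases pvFoldA_mem (p0 :: rest) (p0.1, p0.2) with h | h
      · rw [h]; exact List.mem_cons_self
      · exact h
    have hA_ub : ∀ p ∈ (p0 :: rest), pvLexLe p (List.foldl pvStepA (p0.1, p0.2) (p0 :: rest)) :=
      (pvFoldA_ub (p0 :: rest) (p0.1, p0.2)).2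
    -- antisymmetry
    have heq : List.foldl pvStepA (p0.1, p0.2) (p0 :: rest) = (mx, my) :=
      pvLexLe_antisymm (hB_ub _ hA_mem) (hA_ub _ hB_mem)
    simp only [detect_most_right_bottom_corner, detect_most_right_bottom_corner_alt, hmx', hmy]
    rw [heq]

-- ===== VERDICT (by name: the statement is the Claim_ definition above) =====
theorem detect_most_right_bottom_corner_spec : Claim_equal_detect_most_right_bottom_corner := by
  intro points _
  unfold Spec_detect_most_right_bottom_corner
  exact pvMain points
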